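-- pv_equiv track=rewrite | github.com/akiladonz/QuarterPlus | Quarter+.py | TerminalDistance10_Calc
-- ===== SOURCE A (Python) =====
-- def TerminalDistance10_Calc(Prediction_Score_byProteins):
--       Terminal_Distance10= []
--       terminaldistance10=0
--       b = 0
--       for Prediction_Score_byProtein in Prediction_Score_byProteins:
--                                         for b in range(0, (len(Prediction_Score_byProtein)), 1):
--                                                       if b <10 : terminaldistance10= b
--                                                       elif (len(Prediction_Score_byProtein))-(b+1)<10 :terminaldistance10 = ((len(Prediction_Score_byProtein))-(b+1))
--                                                       else : terminaldistance10 = 10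
--                                                       Terminal_Distance10.append(terminaldistance10)
--       return Terminal_Distance10
-- ===== SOURCE B (Python) =====
-- def TerminalDistance10_Calc(Prediction_Score_byProteins):
--     cache = {}
--     out = []
--     for protein in Prediction_Score_byProteins:
--         n = len(protein)
--         seg = cache.get(n)
--         if seg is None:
--             if n <= 10:
--                 seg = list(range(n))
--             else:
--                 seg = list(range(10)) + [10] * (n - 20) + list(range(min(n - 10, 10) - 1, -1, -1))
--             cache[n] = seg
--         out += seg
--     return out
-- ===== Notes on version B (the rewrite author's own statement) =====
-- stated objective: faster
-- what changed: Instead of computing a per-index branch at every position, B assembles each protein's value segment from three constant-shaped blocks (ascending run 0..9, plateau of 10s via list repetition, descending countdown) and memoises the segment per length in a dict, so repeated lengths reuse the cached block and per-element Python-level work disappears.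
import Mathlib
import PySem

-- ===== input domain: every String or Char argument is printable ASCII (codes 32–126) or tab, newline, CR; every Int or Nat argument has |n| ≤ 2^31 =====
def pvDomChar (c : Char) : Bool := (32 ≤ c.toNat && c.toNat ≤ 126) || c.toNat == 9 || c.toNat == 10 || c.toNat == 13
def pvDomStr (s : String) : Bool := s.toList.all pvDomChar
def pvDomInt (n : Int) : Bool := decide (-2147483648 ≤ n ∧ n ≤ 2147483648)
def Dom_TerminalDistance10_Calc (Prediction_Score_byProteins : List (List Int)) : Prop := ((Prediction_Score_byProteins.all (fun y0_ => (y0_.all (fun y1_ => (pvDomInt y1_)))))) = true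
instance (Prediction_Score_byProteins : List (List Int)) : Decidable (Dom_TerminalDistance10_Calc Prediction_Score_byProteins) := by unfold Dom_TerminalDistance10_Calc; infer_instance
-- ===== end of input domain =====

-- B builds each protein's segment from three constant-shaped blocks (front run 0..9,
-- plateau of 10s, reversed countdown) memoised by length, instead of A's per-index branch.

-- ===== PORT A =====
-- inner loop: for b in range(0, len(p), 1): branch, then append
def TerminalDistance10_Calc (Prediction_Score_byProteins : List (List Int)) : List Int :=
  Prediction_Score_byProteins.foldl
    (fun acc p =>
      (PySem.List.pyRange 0 (p.length : Int) 1).foldl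
        (fun acc2 b =>
          let terminaldistance10 : Int :=
            if b < 10 then b
            else if (p.length : Int) - (b + 1) < 10 then (p.length : Int) - (b + 1)
            else 10
          acc2 ++ [terminaldistance10])
        acc)
    []

-- ===== PORT B =====
-- cache.get(n); on miss: range(n) for n<=10 else range(10) + [10]*(n-20) + range(min(n-10,10)-1,-1,-1)
def TerminalDistance10_Calc_alt (Prediction_Score_byProteins : List (List Int)) : List Int :=
  (Prediction_Score_byProteins.foldl
    (fun (st : PySem.Dict Int (List Int) × List Int) protein =>
      let n : Int := (protein.length : Int)
      match st.1.get? n with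
      | some seg => (st.1, st.2 ++ seg)
      | none =>
        let seg : List Int :=
          if n ≤ 10 then PySem.List.pyRange 0 n 1
          else PySem.List.pyRange 0 10 1 ++ PySem.List.pyRepeat [10] (n - 20)
               ++ PySem.List.pyRange (min (n - 10) 10 - 1) (-1) (-1)
        (st.1.insert n seg, st.2 ++ seg))
    (PySem.Dict.empty, [])).2

-- ===== PRECONDITION & SPEC =====
def Spec_TerminalDistance10_Calc (Prediction_Score_byProteins : List (List Int)) (out : List Int) : Prop := out = TerminalDistance10_Calc_alt Prediction_Score_byProteins
instance (Prediction_Score_byProteins : List (List Int)) (out : List Int) : Decidable (Spec_TerminalDistance10_Calc Prediction_Score_byProteins out) := by unfold Spec_TerminalDistance10_Calc; infer_instance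

-- ===== CLAIM (what is proved, stated in full; the proofs are below) =====
def Claim_equal_TerminalDistance10_Calc : Prop := ∀ (Prediction_Score_byProteins : List (List Int)), Dom_TerminalDistance10_Calc Prediction_Score_byProteins → Spec_TerminalDistance10_Calc Prediction_Score_byProteins (TerminalDistance10_Calc Prediction_Score_byProteins)

-- ===== LEMMAS AND PROOFS =====

-- the segment B computes for a protein length n (proof-side abbreviation of B's miss branch)
def pvSeg (n : Int) : List Int :=
  if n ≤ 10 then PySem.List.pyRange 0 n 1
  else PySem.List.pyRange 0 10 1 ++ PySem.List.pyRepeat [10] (n - 20)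
       ++ PySem.List.pyRange (min (n - 10) 10 - 1) (-1) (-1)

-- A's per-index branch over range(n) equals B's block segment
theorem pvSeg_eq (n : Int) (hn : 0 ≤ n) :
    (PySem.List.pyRange 0 n 1).map
        (fun b => if b < 10 then b else if n - (b + 1) < 10 then n - (b + 1) else 10)
      = pvSeg n := by
  unfold pvSeg
  by_cases h : n ≤ 10
  · rw [if_pos h, List.map_congr_left (g := id) ?_, List.map_id]
    intro b hb
    rw [PySem.List.mem_pyRange_one] at hb
    simp [show b < 10 by omega]
  · push Not at h
    rw [if_neg (by omega)]
    rw [PySem.List.pyRange_one_append 0 10 n (by omega) (by omega), List.map_append]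
    have hfront : (PySem.List.pyRange 0 10 1).map
        (fun b => if b < 10 then b else if n - (b + 1) < 10 then n - (b + 1) else 10)
        = PySem.List.pyRange 0 10 1 := by
      rw [List.map_congr_left (g := id) ?_, List.map_id]
      intro b hb
      rw [PySem.List.mem_pyRange_one] at hb
      simp [show b < 10 by omega]
    rw [hfront, List.append_assoc]
    congr 1
    rw [PySem.List.pyRepeat_singleton]
    by_cases h20 : 20 ≤ n
    · -- long protein: plateau of 10s then countdown 9..0
      rw [min_eq_right (by omega), PySem.List.pyRange_one_append 10 (n - 10) n (by omega) (by omega),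
          List.map_append]
      congr 1
      · -- middle: all values are 10
        rw [List.map_congr_left (g := fun _ => (10 : Int)) ?_]
        · rw [List.map_const', PySem.List.length_pyRange_one]
          congr 1
          omega
        · intro b hb
          rw [PySem.List.mem_pyRange_one] at hb
          show (if b < 10 then b else if n - (b + 1) < 10 then n - (b + 1) else 10) = 10
          split_ifs with h1 h2 <;> omega
      · -- tail: countdown
        rw [PySem.List.pyRange_one, PySem.List.pyRange_neg_one, List.map_map]
        have hlen : (n - (n - 10)).toNat = (9 - (-1) : Int).toNat := by omega
        rw [hlen]
        apply List.map_congr_left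
        intro k hk
        rw [List.mem_range] at hk
        simp only [Function.comp]
        split_ifs with h1 h2 <;> omega
    · -- medium protein 10 < n < 20: empty plateau, countdown n-11..0
      push Not at h20
      rw [min_eq_left (by omega)]
      have : (n - 20).toNat = 0 := by omega
      rw [this, List.replicate_zero, List.nil_append]
      rw [PySem.List.pyRange_one, PySem.List.pyRange_neg_one, List.map_map]
      have hlen : (n - 10).toNat = (n - 10 - 1 - (-1)).toNat := by omega
      rw [hlen]
      apply List.map_congr_left
      intro k hk
      rw [List.mem_range] at hk
      simp only [Function.comp]
      split_ifs with h1 h2 <;> omega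

-- B's fold, under the cache invariant, equals the plain segment-append fold
theorem pvB_fold (ps : List (List Int)) (d : PySem.Dict Int (List Int)) (out : List Int)
    (hinv : ∀ k v, d.get? k = some v → v = pvSeg k) :
    (ps.foldl
      (fun (st : PySem.Dict Int (List Int) × List Int) protein =>
        let n : Int := (protein.length : Int)
        match st.1.get? n with
        | some seg => (st.1, st.2 ++ seg)
        | none =>
          let seg : List Int :=
            if n ≤ 10 then PySem.List.pyRange 0 n 1
            else PySem.List.pyRange 0 10 1 ++ PySem.List.pyRepeat [10] (n - 20)
                 ++ PySem.List.pyRange (min (n - 10) 10 - 1) (-1) (-1)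
          (st.1.insert n seg, st.2 ++ seg))
      (d, out)).2
    = ps.foldl (fun acc p => acc ++ pvSeg (p.length : Int)) out := by
  induction ps generalizing d out with
  | nil => rfl
  | cons p ps ih =>
    simp only [List.foldl_cons]
    cases hget : d.get? (p.length : Int) with
    | some seg =>
      have hseg := hinv _ _ hget
      subst hseg
      exact ih d _ hinv
    | none =>
      refine (ih _ _ ?_).trans (by rw [pvSeg])
      intro k v hkv
      by_cases hk : k = (p.length : Int)
      · subst hk
        rw [PySem.Dict.get?_insert_self] at hkv
        rw [pvSeg]
        exact (Option.some.injEq _ _).mp hkv |>.symm ▸ rfl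
      · exact hinv k v (by rwa [PySem.Dict.get?_insert_of_ne _ _ hk] at hkv)

-- A's fold equals the same plain segment-append fold
theorem pvA_fold (ps : List (List Int)) (acc : List Int) :
    ps.foldl
      (fun acc p =>
        (PySem.List.pyRange 0 (p.length : Int) 1).foldl
          (fun acc2 b =>
            let terminaldistance10 : Int :=
              if b < 10 then b
              else if (p.length : Int) - (b + 1) < 10 then (p.length : Int) - (b + 1)
              else 10
            acc2 ++ [terminaldistance10]) acc) acc
    = ps.foldl (fun acc p => acc ++ pvSeg (p.length : Int)) acc := by
  induction ps generalizing acc with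
  | nil => rfl
  | cons p ps ih =>
    rw [List.foldl_cons, List.foldl_cons,
        PySem.List.foldl_append_singleton_eq_map, pvSeg_eq _ (Int.natCast_nonneg _)]
    exact ih _

-- ===== VERDICT (by name: the statement is the Claim_ definition above) =====
theorem TerminalDistance10_Calc_spec : Claim_equal_TerminalDistance10_Calc := by
  intro ps _
  unfold Spec_TerminalDistance10_Calc TerminalDistance10_Calc TerminalDistance10_Calc_alt
  rw [pvA_fold, pvB_fold ps PySem.Dict.empty []
      (fun k v h => by rw [PySem.Dict.get?_empty] at h; exact absurd h (by simp))]
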